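-- pv_equiv track=rewrite | github.com/progsi/YTUnCoverLLM | preprocessing/Utils.py | find_closest_nonspace_idx
-- ===== SOURCE A (Python) =====
-- def find_closest_nonspace_idx(s: str, char_idx: int, direction: str) -> int:
--     """
--     Args:
--         s (str): the string
--         char_idx: (int): initial index
--         direction (str): left or right?
--     Returns:
--         int: the closest index with not space as char, or -1 if not found
--     """
--     if s[char_idx] != " ":
--         return char_idx
--     assert direction in ["left", "right"], "Direction must be left or right!"
--
--     if direction == "left":
--         # Iterate from char_idx to the left end of the string
--         for i in range(char_idx - 1, -1, -1):
--             if s[i] != ' ':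
--                 return i
--     elif direction == "right":
--         # Iterate from char_idx to the right end of the string
--         for i in range(char_idx + 1, len(s)):
--             if s[i] != ' ':
--                 return i
--     return -1
-- ===== SOURCE B (Python) =====
-- def find_closest_nonspace_idx(s: str, char_idx: int, direction: str) -> int:
--     if s[char_idx] != " ":
--         return char_idx
--     assert direction in ["left", "right"], "Direction must be left or right!"
--     if direction == "left":
--         # all-space (or empty) prefix yields len('') - 1 == -1 automatically
--         return len(s[:char_idx].rstrip(' ')) - 1
--     else:
--         sub = s[char_idx + 1:]
--         stripped = sub.lstrip(' ')
--         if stripped == '':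
--             return -1
--         return char_idx + 1 + (len(sub) - len(stripped))
-- ===== Notes on version B (the rewrite author's own statement) =====
-- stated objective: simpler
-- what changed: Replaces both explicit index-scanning loops with string stripping: left answer is len(prefix.rstrip(' '))-1 and right answer is computed from how many spaces lstrip(' ') removes from the suffix, so B contains no loop at all.
-- outside the precondition, e.g. on find_closest_nonspace_idx('a ', -1, 'left'): A returns -1, B returns 0
import Mathlib
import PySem

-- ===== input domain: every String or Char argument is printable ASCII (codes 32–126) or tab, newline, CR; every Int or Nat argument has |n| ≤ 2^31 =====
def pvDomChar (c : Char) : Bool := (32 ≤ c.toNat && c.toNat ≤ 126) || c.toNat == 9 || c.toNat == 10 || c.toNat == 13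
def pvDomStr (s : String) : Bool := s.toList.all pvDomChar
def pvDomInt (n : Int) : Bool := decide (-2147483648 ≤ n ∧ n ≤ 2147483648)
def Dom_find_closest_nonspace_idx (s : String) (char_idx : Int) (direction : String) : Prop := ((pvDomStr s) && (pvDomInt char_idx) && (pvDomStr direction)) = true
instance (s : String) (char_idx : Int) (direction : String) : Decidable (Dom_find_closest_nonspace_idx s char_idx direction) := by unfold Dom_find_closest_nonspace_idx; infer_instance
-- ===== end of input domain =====

-- B replaces A's two index-scanning loops by prefix/suffix space-stripping (simpler, no loop).


-- ===== PORT A =====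
-- A's scan loop: first index in idxs whose char is not ' ', else -1 (indices are in range under Pre_)
def pvScanA (cs : List Char) (idxs : List Int) : Int :=
  match idxs with
  | [] => -1
  | i :: rest => if PySem.List.pyGetD cs i ' ' ≠ ' ' then i else pvScanA cs rest

def find_closest_nonspace_idx (s : String) (char_idx : Int) (direction : String) : Int :=
  -- s[char_idx]: IndexError outside range, excluded by Pre_ (getD default never read there)
  if (PySem.Str.pyGet? s char_idx).getD ' ' ≠ ' ' then char_idx
  -- assert direction in ["left","right"]: AssertionError otherwise, excluded by Pre_
  else if direction = "left" then
    pvScanA s.toList (PySem.List.pyRange (char_idx - 1) (-1) (-1))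
  else if direction = "right" then
    pvScanA s.toList (PySem.List.pyRange (char_idx + 1) (PySem.Str.len s) 1)
  else -1

-- ===== PORT B =====
def find_closest_nonspace_idx_alt (s : String) (char_idx : Int) (direction : String) : Int :=
  if (PySem.Str.pyGet? s char_idx).getD ' ' ≠ ' ' then char_idx
  else if direction = "left" then
    -- len(s[:char_idx].rstrip(' ')) - 1 ; rstrip(' ') is rdropWhile (· == ' ') (exact: strips only spaces)
    (((PySem.List.slice s.toList none (some char_idx)).rdropWhile (· == ' ')).length : Int) - 1
  else if direction = "right" then
    -- sub = s[char_idx+1:]; stripped = sub.lstrip(' ') ; lstrip(' ') is dropWhile (· == ' ')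
    let sub := PySem.List.slice s.toList (some (char_idx + 1)) none
    let stripped := sub.dropWhile (· == ' ')
    if stripped = [] then -1
    else char_idx + 1 + ((sub.length : Int) - (stripped.length : Int))
  else -1

-- ===== PRECONDITION & SPEC =====
-- Pre_ excludes inputs where A raises (out-of-range index → IndexError; space at char_idx with a
-- direction other than "left"/"right" → AssertionError) and negative in-range indices that point
-- at a space, where Python's wraparound indexing makes A's scan over the raw negative range an
-- implementation accident (its value collides with the -1 "not found" sentinel).
def Pre_find_closest_nonspace_idx (s : String) (char_idx : Int) (direction : String) : Prop :=
  PySem.Raise.InRange s.toList.length char_idx ∧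
  (PySem.List.pyGet? s.toList char_idx ≠ some ' ' ∨
    (0 ≤ char_idx ∧ (direction = "left" ∨ direction = "right")))
instance (s : String) (char_idx : Int) (direction : String) : Decidable (Pre_find_closest_nonspace_idx s char_idx direction) := by unfold Pre_find_closest_nonspace_idx; infer_instance

def pvWitness_find_closest_nonspace_idx : String × Int × String := ("ab ", 2, "left")

def Spec_find_closest_nonspace_idx (s : String) (char_idx : Int) (direction : String) (out : Int) : Prop := out = find_closest_nonspace_idx_alt s char_idx direction
instance (s : String) (char_idx : Int) (direction : String) (out : Int) : Decidable (Spec_find_closest_nonspace_idx s char_idx direction out) := by unfold Spec_find_closest_nonspace_idx; infer_instance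

-- ===== CLAIM (what is proved, stated in full; the proofs are below) =====
def Claim_equal_find_closest_nonspace_idx : Prop := ∀ (s : String) (char_idx : Int) (direction : String), Dom_find_closest_nonspace_idx s char_idx direction → Pre_find_closest_nonspace_idx s char_idx direction → Spec_find_closest_nonspace_idx s char_idx direction (find_closest_nonspace_idx s char_idx direction)

-- ===== LEMMAS AND PROOFS =====

-- Left scan over the countdown range equals rstrip-length of the prefix.
theorem pvScan_left (cs : List Char) (k : Nat) (hk : k ≤ cs.length) :
    pvScanA cs (PySem.List.pyRange ((k : Int) - 1) (-1) (-1)) =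
      (((cs.take k).rdropWhile (· == ' ')).length : Int) - 1 := by
  induction k with
  | zero =>
    rw [PySem.List.pyRange_neg_one_eq_nil (by omega)]
    simp [pvScanA]
  | succ k ih =>
    have hk' : k < cs.length := by omega
    rw [show ((k + 1 : Nat) : Int) - 1 = (k : Int) by push_cast; ring,
        PySem.List.pyRange_neg_one_cons (by omega)]
    have htake : cs.take (k + 1) = cs.take k ++ [cs[k]] := by
      rw [List.take_add_one]; simp [List.getElem?_eq_getElem hk']
    rw [htake, List.rdropWhile_concat]
    simp only [pvScanA, PySem.List.pyGetD_natCast, List.getD_eq_getElem?_getD,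
      List.getElem?_eq_getElem hk', Option.getD_some]
    by_cases hc : cs[k] = ' '
    · simp only [hc, ne_eq, not_true_eq_false, if_false]
      exact ih (by omega)
    · simp [hc]
      omega

-- Right scan over the ascending range equals the lstrip computation on the suffix.
theorem pvScan_right (cs : List Char) (j : Nat) :
    pvScanA cs (PySem.List.pyRange (j : Int) (cs.length : Int) 1) =
      (if (cs.drop j).dropWhile (· == ' ') = [] then (-1 : Int)
       else (j : Int) + (((cs.drop j).length : Int) - (((cs.drop j).dropWhile (· == ' ')).length : Int))) := by
  induction hn : cs.length - j generalizing j with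
  | zero =>
    have hj : cs.length ≤ j := by omega
    rw [PySem.List.pyRange_one_eq_nil (by exact_mod_cast hj)]
    simp [pvScanA, List.drop_eq_nil_of_le hj]
  | succ n ih =>
    have hj : j < cs.length := by omega
    rw [PySem.List.pyRange_one_cons (by exact_mod_cast hj)]
    have hdrop : cs.drop j = cs[j] :: cs.drop (j + 1) := List.drop_eq_getElem_cons hj
    have hgd : PySem.List.pyGetD cs (j : Int) ' ' = cs[j] := by
      simp [List.getD_eq_getElem?_getD, List.getElem?_eq_getElem hj]
    rw [hdrop]
    simp only [pvScanA, hgd]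
    have hle : ((cs.drop (j + 1)).dropWhile (· == ' ')).length ≤ (cs.drop (j + 1)).length :=
      List.length_dropWhile_le _ _
    by_cases hc : cs[j] = ' '
    · rw [if_neg (by simp [hc]),
          show ((j : Int) + 1) = ((j + 1 : Nat) : Int) by push_cast; ring,
          ih (j + 1) (by omega)]
      have hdw : (cs[j] :: cs.drop (j + 1)).dropWhile (· == ' ')
          = (cs.drop (j + 1)).dropWhile (· == ' ') := by
        rw [List.dropWhile_cons]; simp [hc]
      rw [hdw, List.length_cons]
      split_ifs with h
      · rfl
      · push_cast
        ring
    · have hdw : (cs[j] :: cs.drop (j + 1)).dropWhile (· == ' ')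
          = cs[j] :: cs.drop (j + 1) := by
        rw [List.dropWhile_cons]; simp [hc]
      rw [if_pos hc, hdw, if_neg (List.cons_ne_nil _ _), List.length_cons]
      push_cast
      ring

-- ===== VERDICT (by name: the statement is the Claim_ definition above) =====
theorem find_closest_nonspace_idx_spec : Claim_equal_find_closest_nonspace_idx := by
  intro s char_idx direction _ hpre
  obtain ⟨hin, hrest⟩ := hpre
  unfold Spec_find_closest_nonspace_idx find_closest_nonspace_idx find_closest_nonspace_idx_alt
  rcases h : PySem.List.pyGet? s.toList char_idx with _ | c
  · exact absurd hin (by rwa [← PySem.List.pyGet?_eq_none_iff])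
  · by_cases hc : c = ' '
    · subst hc
      obtain ⟨h0, hdir⟩ := hrest.resolve_left (by simp [h])
      obtain ⟨k, rfl⟩ : ∃ k : Nat, char_idx = (k : Int) := ⟨char_idx.toNat, (Int.toNat_of_nonneg h0).symm⟩
      have h' : s.toList[k]? = some ' ' := by simpa using h
      obtain ⟨hk, hck⟩ := List.getElem?_eq_some_iff.mp h'
      simp only [PySem.Str.pyGet?_natCast, h', Option.getD_some, ne_eq, not_true_eq_false, if_false]
      rcases hdir with rfl | rfl
      · simp only [reduceIte]
        rw [PySem.List.slice_to_natCast, pvScan_left s.toList k hk.le]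
      · simp only [reduceIte]
        rw [show ((k : Int) + 1) = ((k + 1 : Nat) : Int) by push_cast; ring,
            PySem.List.slice_from_natCast,
            show PySem.Str.len s = (s.toList.length : Int) by simp,
            pvScan_right s.toList (k + 1)]
        by_cases hst : (s.toList.drop (k + 1)).dropWhile (· == ' ') = []
        · simp [hst]
        · simp only [hst, if_false]
          push_cast
          ring
    · simp [h, hc]
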